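-- pv_equiv track=rewrite | github.com/yi-ye-zhi-qiu/leeuhm.gg | model/train_xgb.py | compute_streaks
-- ===== SOURCE A (Python) =====
-- STREAK_THRESHOLDS = [1, 2, 3, 5, 10]
--
-- def compute_streaks(results: list[bool]) -> dict:
--     """Given a list of win/loss booleans (oldest first), return streak indicators."""
--     n = len(results)
--     streaks = {}
--     for threshold in STREAK_THRESHOLDS:
--         if n >= threshold:
--             recent = results[-threshold:]
--             streaks[f"win_streak_{threshold}"] = 1 if all(recent) else 0
--             streaks[f"loss_streak_{threshold}"] = 1 if not any(recent) else 0
--         else: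
--             streaks[f"win_streak_{threshold}"] = 0
--             streaks[f"loss_streak_{threshold}"] = 0
--     return streaks
-- ===== SOURCE B (Python) =====
-- STREAK_THRESHOLDS = [1, 2, 3, 5, 10]
--
-- def compute_streaks(results: list[bool]) -> dict:
--     """Single backward scan: trailing win/loss run lengths, then threshold flags."""
--     win_run = 0
--     for r in reversed(results):
--         if not r:
--             break
--         win_run += 1
--     loss_run = 0
--     for r in reversed(results):
--         if r:
--             break
--         loss_run += 1
--     streaks = {}
--     for t in STREAK_THRESHOLDS:
--         streaks[f"win_streak_{t}"] = 1 if win_run >= t else 0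
--         streaks[f"loss_streak_{t}"] = 1 if loss_run >= t else 0
--     return streaks
-- ===== Notes on version B (the rewrite author's own statement) =====
-- stated objective: simpler
-- what changed: Replaces per-threshold slicing with all()/any() rescans by one backward pass computing the trailing win-run and loss-run lengths, from which every threshold flag is a single comparison.
import Mathlib
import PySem

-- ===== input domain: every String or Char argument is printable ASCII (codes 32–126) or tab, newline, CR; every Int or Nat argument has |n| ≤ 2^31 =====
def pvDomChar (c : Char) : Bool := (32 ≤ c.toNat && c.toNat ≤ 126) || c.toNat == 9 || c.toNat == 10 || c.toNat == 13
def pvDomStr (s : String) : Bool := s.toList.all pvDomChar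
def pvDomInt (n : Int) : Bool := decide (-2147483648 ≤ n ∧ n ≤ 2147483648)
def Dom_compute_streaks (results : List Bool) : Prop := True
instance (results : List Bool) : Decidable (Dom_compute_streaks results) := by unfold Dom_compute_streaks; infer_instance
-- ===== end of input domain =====

-- B replaces A's per-threshold slice + all()/any() rescans by one trailing-run count per outcome; objective: simpler.

def STREAK_THRESHOLDS : List Int := [1, 2, 3, 5, 10]

-- ===== PORT A =====
def compute_streaks (results : List Bool) : List (String × Int) :=
  let n : Int := results.length
  let streaks : PySem.Dict String Int :=
    STREAK_THRESHOLDS.foldl (fun streaks threshold =>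
      if n ≥ threshold then
        let recent := PySem.List.slice results (some (-threshold)) none
        let streaks := streaks.insert ("win_streak_" ++ PySem.Int.toStr threshold)
          (if recent.all (fun r => r) then 1 else 0)
        streaks.insert ("loss_streak_" ++ PySem.Int.toStr threshold)
          (if !(recent.any (fun r => r)) then 1 else 0)
      else
        let streaks := streaks.insert ("win_streak_" ++ PySem.Int.toStr threshold) 0
        streaks.insert ("loss_streak_" ++ PySem.Int.toStr threshold) 0)
      PySem.Dict.empty
  streaks.items

-- ===== PORT B =====
-- Source B's two break-loops over reversed(results) count the trailing run: takeWhile on the reverse;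
-- its dict-building loop only ever appends fresh keys, so its items list is built directly.
def compute_streaks_alt (results : List Bool) : List (String × Int) :=
  let win_run : Int := (results.reverse.takeWhile (fun r => r)).length
  let loss_run : Int := (results.reverse.takeWhile (fun r => !r)).length
  STREAK_THRESHOLDS.flatMap (fun t =>
    [("win_streak_" ++ PySem.Int.toStr t, if win_run ≥ t then (1 : Int) else 0),
     ("loss_streak_" ++ PySem.Int.toStr t, if loss_run ≥ t then (1 : Int) else 0)])

-- ===== PRECONDITION & SPEC =====
def Spec_compute_streaks (results : List Bool) (out : List (String × Int)) : Prop := out = compute_streaks_alt results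
instance (results : List Bool) (out : List (String × Int)) : Decidable (Spec_compute_streaks results out) := by unfold Spec_compute_streaks; infer_instance

-- ===== CLAIM (what is proved, stated in full; the proofs are below) =====
def Claim_equal_compute_streaks : Prop := ∀ (results : List Bool), Dom_compute_streaks results → Spec_compute_streaks results (compute_streaks results)

-- ===== LEMMAS AND PROOFS =====

-- all of the first t elements of m are p iff the leading p-run of m has length ≥ t (for t ≤ |m|)
theorem take_all_iff_takeWhile (p : Bool → Bool) (m : List Bool) (t : Nat) (h : t ≤ m.length) :
    (m.take t).all p = decide (t ≤ (m.takeWhile p).length) := by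
  induction m generalizing t with
  | nil => simp_all
  | cons x xs ih =>
    cases t with
    | zero => simp
    | succ t =>
      simp only [List.take_succ_cons, List.all_cons, List.takeWhile_cons]
      cases hp : p x with
      | false => simp
      | true =>
        simp only [Bool.true_and]
        rw [ih t (by simpa using h)]
        simp

-- A's per-threshold flag (guard + slice + all) equals B's trailing-run comparison
theorem flag_eq (p : Bool → Bool) (results : List Bool) (t : Nat) (ht : 0 < t) :
    (if (results.length : Int) ≥ (t : Int) then
       (if (PySem.List.slice results (some (-(t : Int))) none).all p then (1 : Int) else 0)
     else 0)
    = (if ((results.reverse.takeWhile p).length : Int) ≥ (t : Int) then 1 else 0) := by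
  have hwle : (results.reverse.takeWhile p).length ≤ results.length := by
    simpa using (List.takeWhile_prefix (l := results.reverse) p).length_le
  by_cases h : t ≤ results.length
  · rw [if_pos (by exact_mod_cast h)]
    rw [PySem.List.slice_from_neg_natCast results t ht]
    have hd : results.drop (results.length - t) = (results.reverse.take t).reverse := by
      rw [List.take_reverse, List.reverse_reverse]
    rw [hd, List.all_reverse, take_all_iff_takeWhile p _ t (by simpa using h)]
    by_cases h2 : t ≤ (results.reverse.takeWhile p).length
    · rw [if_pos (by simpa using h2), if_pos (by exact_mod_cast h2)]
    · rw [if_neg (by simpa using h2), if_neg (by exact_mod_cast h2)]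
  · rw [if_neg (by exact_mod_cast h), if_neg (by omega)]

theorem not_any_eq_all_not (l : List Bool) : (!(l.any fun r => r)) = l.all fun r => !r := by
  induction l with
  | nil => simp
  | cons x xs ih => cases x <;> simp_all

-- one iteration of A's dict-building loop equals the corresponding two entries of B
theorem step_eq (results : List Bool) (d : PySem.Dict String Int) (t : Nat) (ht : 0 < t) :
    (if (results.length : Int) ≥ (t : Int) then
       (d.insert ("win_streak_" ++ PySem.Int.toStr (t : Int))
           (if (PySem.List.slice results (some (-(t : Int))) none).all (fun r => r) then (1 : Int) else 0)).insert
         ("loss_streak_" ++ PySem.Int.toStr (t : Int))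
         (if !((PySem.List.slice results (some (-(t : Int))) none).any (fun r => r)) then (1 : Int) else 0)
     else
       (d.insert ("win_streak_" ++ PySem.Int.toStr (t : Int)) 0).insert
         ("loss_streak_" ++ PySem.Int.toStr (t : Int)) 0)
    = (d.insert ("win_streak_" ++ PySem.Int.toStr (t : Int))
         (if ((results.reverse.takeWhile (fun r => r)).length : Int) ≥ (t : Int) then 1 else 0)).insert
        ("loss_streak_" ++ PySem.Int.toStr (t : Int))
        (if ((results.reverse.takeWhile (fun r => !r)).length : Int) ≥ (t : Int) then 1 else 0) := by
  have hw := flag_eq (fun r => r) results t ht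
  have hl := flag_eq (fun r => !r) results t ht
  have hna := not_any_eq_all_not (PySem.List.slice results (some (-(t : Int))) none)
  by_cases hn : (results.length : Int) ≥ (t : Int)
  · rw [if_pos hn] at hw hl ⊢
    rw [hna, hw, hl]
  · rw [if_neg hn] at hw hl ⊢
    rw [← hw, ← hl]

-- ===== VERDICT (by name: the statement is the Claim_ definition above) =====
theorem compute_streaks_spec : Claim_equal_compute_streaks := by
  intro results _
  show compute_streaks results = compute_streaks_alt results
  have s1 := step_eq results (t := 1) (ht := by norm_num)
  have s2 := step_eq results (t := 2) (ht := by norm_num)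
  have s3 := step_eq results (t := 3) (ht := by norm_num)
  have s5 := step_eq results (t := 5) (ht := by norm_num)
  have s10 := step_eq results (t := 10) (ht := by norm_num)
  push_cast at s1 s2 s3 s5 s10
  simp only [compute_streaks, compute_streaks_alt, STREAK_THRESHOLDS,
    List.foldl_cons, List.foldl_nil, List.flatMap_cons, List.flatMap_nil]
  rw [s1, s2, s3, s5, s10]
  simp only [show PySem.Int.toStr 1 = "1" from rfl, show PySem.Int.toStr 2 = "2" from rfl,
    show PySem.Int.toStr 3 = "3" from rfl, show PySem.Int.toStr 5 = "5" from rfl,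
    show PySem.Int.toStr 10 = "10" from rfl]
  simp [PySem.Dict.items_insert, PySem.Dict.contains_insert, PySem.Dict.empty]
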